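-- pv_equiv track=rewrite | github.com/ai-kmu/2024_winter_study | algorithm/Exhaustive Search/박주빈_2.py | distributeCookies
-- ===== SOURCE A (Python) =====
-- from typing import List
--
-- def distributeCookies(cookies: List[int], k: int) -> int:
--     def dfs(index, children):
--
--         if index == len(cookies):
--             return max(children)
--
--         min_unfairness = float('inf')
--
--         for i in range(k):
--             children[i] += cookies[index]
--             min_unfairness = min(min_unfairness, dfs(index + 1, children))
--             children[i] -= cookies[index]
--
--         return min_unfairness
--
--     children = [0] * k
--     return dfs(0, children)
-- ===== SOURCE B (Python) =====
-- def distributeCookies(cookies, k):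
--     # Breadth-first frontier enumeration: keep the list of all reachable
--     # children-sum vectors after each cookie, then take min of max at the end.
--     states = [[0] * k]
--     for c in cookies:
--         states = [s[:i] + [s[i] + c] + s[i + 1:] for s in states for i in range(k)]
--     return min(max(s) for s in states)
-- ===== Notes on version B (the rewrite author's own statement) =====
-- stated objective: alternative
-- what changed: Replaces A's depth-first backtracking recursion (mutating one shared children array) with an iterative breadth-first frontier: a loop over cookies that rebuilds the full list of reachable children-sum vectors, followed by one min-of-max pass.
-- outside the precondition, e.g. on distributeCookies([1], 0): A returns inf, B raises ValueError
import Mathlib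
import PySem

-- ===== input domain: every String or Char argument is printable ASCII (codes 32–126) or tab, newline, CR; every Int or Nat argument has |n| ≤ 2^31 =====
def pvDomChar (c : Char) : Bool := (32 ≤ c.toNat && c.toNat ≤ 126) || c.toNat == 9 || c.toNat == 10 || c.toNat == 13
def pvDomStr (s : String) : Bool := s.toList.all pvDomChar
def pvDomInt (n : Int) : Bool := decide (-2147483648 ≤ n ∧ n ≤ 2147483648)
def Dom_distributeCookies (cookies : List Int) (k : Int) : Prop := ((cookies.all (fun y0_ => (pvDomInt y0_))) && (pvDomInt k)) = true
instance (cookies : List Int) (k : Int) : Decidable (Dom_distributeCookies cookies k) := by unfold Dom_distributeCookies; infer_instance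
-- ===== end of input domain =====

-- B replaces A's depth-first backtracking recursion by an iterative breadth-first
-- frontier of all reachable children-sum vectors (objective: alternative structure).

-- ===== PORT A =====
-- Python's float('inf') sentinel / the ValueError of max([]) are both modelled by
-- none (under Pre_ (1 ≤ k) the dfs always returns an Int, i.e. some).
def pvOptMin (a b : Option Int) : Option Int :=
  match a, b with
  | none, b => b
  | a, none => a
  | some x, some y => some (min x y)

-- dfs(index, children): structural recursion on the suffix cookies[index:].
-- children[i] += cookies[index]; recurse; children[i] -= cookies[index] becomes a
-- functional update (i < len(children) always holds in A, so getD is exact).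
def pvDfsA (k : Nat) (rest : List Int) (children : List Int) : Option Int :=
  match rest with
  | [] => PySem.List.max? children (fun y => y)
  | c :: rest' =>
    (List.range k).foldl
      (fun acc i => pvOptMin acc (pvDfsA k rest' (children.set i (children.getD i 0 + c))))
      none

-- [0]*k is [] for k ≤ 0, matching Int.toNat; .getD 0 only unwraps the some that
-- Pre_ guarantees (outside Pre_ the Python value is not an int).
def distributeCookies (cookies : List Int) (k : Int) : Int :=
  (pvDfsA k.toNat cookies (List.replicate k.toNat 0)).getD 0

-- ===== PORT B =====
-- Python max(s) / min(l) on a nonempty list (the [] case is unreachable under Pre_).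
def pvListMax : List Int → Int
  | [] => 0
  | x :: xs => xs.foldl max x

def pvListMin : List Int → Int
  | [] => 0
  | x :: xs => xs.foldl min x

-- s[:i] + [s[i] + c] + s[i+1:]  (i < len(s) always holds in B, so set/getD are exact)
def pvBump (c : Int) (s : List Int) (i : Nat) : List Int := s.set i (s.getD i 0 + c)

def pvStep (k : Nat) (states : List (List Int)) (c : Int) : List (List Int) :=
  states.flatMap (fun s => (List.range k).map (pvBump c s))

def distributeCookies_alt (cookies : List Int) (k : Int) : Int :=
  let states := cookies.foldl (pvStep k.toNat) [List.replicate k.toNat 0]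
  pvListMin (states.map pvListMax)

-- ===== PRECONDITION & SPEC =====
-- Pre_ excludes k ≤ 0: there A either raises ValueError (max of an empty list, when
-- cookies == []) or returns float('inf'), which is not a value of the declared int type.
def Pre_distributeCookies (cookies : List Int) (k : Int) : Prop := 1 ≤ k
instance (cookies : List Int) (k : Int) : Decidable (Pre_distributeCookies cookies k) := by unfold Pre_distributeCookies; infer_instance

def pvWitness_distributeCookies : List Int × Int := ([8, 15, 10, 20, 8], 2)

def Spec_distributeCookies (cookies : List Int) (k : Int) (out : Int) : Prop := out = distributeCookies_alt cookies k
instance (cookies : List Int) (k : Int) (out : Int) : Decidable (Spec_distributeCookies cookies k out) := by unfold Spec_distributeCookies; infer_instance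

-- ===== CLAIM (what is proved, stated in full; the proofs are below) =====
def Claim_equal_distributeCookies : Prop := ∀ (cookies : List Int) (k : Int), Dom_distributeCookies cookies k → Pre_distributeCookies cookies k → Spec_distributeCookies cookies k (distributeCookies cookies k)

-- ===== LEMMAS AND PROOFS =====

-- The frontier after consuming `rest`, starting from `states`.
def pvE (k : Nat) (rest : List Int) (states : List (List Int)) : List (List Int) :=
  rest.foldl (pvStep k) states

theorem pvStep_append (k : Nat) (a b : List (List Int)) (c : Int) :
    pvStep k (a ++ b) c = pvStep k a c ++ pvStep k b c := by
  simp [pvStep]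

theorem pvE_append (k : Nat) (rest : List Int) (a b : List (List Int)) :
    pvE k rest (a ++ b) = pvE k rest a ++ pvE k rest b := by
  induction rest generalizing a b with
  | nil => rfl
  | cons c rest ih => simpa [pvE, pvStep_append] using ih (pvStep k a c) (pvStep k b c)

theorem pvStep_ne_nil (k : Nat) (hk : 1 ≤ k) (states : List (List Int)) (h : states ≠ [])
    (c : Int) : pvStep k states c ≠ [] := by
  cases states with
  | nil => exact absurd rfl h
  | cons s ss =>
    have hne : (List.range k).map (pvBump c s) ≠ [] := by
      simp [List.map_eq_nil_iff, List.range_eq_nil]; omega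
    simp only [pvStep, List.flatMap_cons]
    intro h
    exact hne (List.append_eq_nil_iff.mp h).1

theorem pvE_ne_nil (k : Nat) (hk : 1 ≤ k) (rest : List Int) :
    ∀ states : List (List Int), states ≠ [] → pvE k rest states ≠ [] := by
  induction rest with
  | nil => intro states h; exact h
  | cons c rest ih =>
    intro states h
    exact ih _ (pvStep_ne_nil k hk states h c)

theorem pvListMin_cons (x : Int) (l : List Int) (h : l ≠ []) :
    pvListMin (x :: l) = min x (pvListMin l) := by
  cases l with
  | nil => exact absurd rfl h
  | cons y ys =>
    show (y :: ys).foldl min x = min x (ys.foldl min y)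
    simp [List.foldl_cons]
    exact List.foldl_assoc

theorem pvListMin_append (l1 l2 : List Int) (h1 : l1 ≠ []) (h2 : l2 ≠ []) :
    pvListMin (l1 ++ l2) = min (pvListMin l1) (pvListMin l2) := by
  induction l1 with
  | nil => exact absurd rfl h1
  | cons x xs ih =>
    cases xs with
    | nil =>
      simpa using pvListMin_cons x l2 h2
    | cons y ys =>
      have hne : (y :: ys) ++ l2 ≠ [] := by simp
      calc pvListMin (x :: (y :: ys ++ l2))
          = min x (pvListMin (y :: ys ++ l2)) := pvListMin_cons x _ hne
        _ = min x (min (pvListMin (y :: ys)) (pvListMin l2)) := by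
              rw [ih (by simp)]
        _ = min (pvListMin (x :: y :: ys)) (pvListMin l2) := by
              rw [pvListMin_cons x (y :: ys) (by simp), min_assoc]

-- foldl of pvOptMin over some-values, starting from some a.
theorem foldl_pvOptMin_some (g : Nat → Int) :
    ∀ (is : List Nat) (a : Int),
      is.foldl (fun acc i => pvOptMin acc (some (g i))) (some a)
        = some (is.foldl (fun x i => min x (g i)) a) := by
  intro is
  induction is with
  | nil => intro a; rfl
  | cons i is ih => intro a; simpa [pvOptMin] using ih (min a (g i))

theorem foldl_pvOptMin_none (g : Nat → Int) (is : List Nat) (h : is ≠ []) :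
    is.foldl (fun acc i => pvOptMin acc (some (g i))) none
      = some (pvListMin (is.map g)) := by
  cases is with
  | nil => exact absurd rfl h
  | cons i is =>
    show is.foldl (fun acc i => pvOptMin acc (some (g i))) (some (g i))
        = some (pvListMin (g i :: is.map g))
    rw [foldl_pvOptMin_some]
    congr 1
    show is.foldl (fun x j => min x (g j)) (g i) = (is.map g).foldl min (g i)
    rw [List.foldl_map]

-- min-of-max over a frontier decomposes state by state.
theorem pvE_min_decompose (k : Nat) (hk : 1 ≤ k) (rest : List Int) :
    ∀ ss : List (List Int), ss ≠ [] →
      pvListMin ((pvE k rest ss).map pvListMax)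
        = pvListMin (ss.map fun s => pvListMin ((pvE k rest [s]).map pvListMax)) := by
  intro ss
  induction ss with
  | nil => intro h; exact absurd rfl h
  | cons s ss ih =>
    intro _
    cases ss with
    | nil => simp [pvListMin]
    | cons t ts =>
      have h1 : pvE k rest [s] ≠ [] := pvE_ne_nil k hk rest [s] (by simp)
      have h2 : pvE k rest (t :: ts) ≠ [] := pvE_ne_nil k hk rest (t :: ts) (by simp)
      have hcons : s :: t :: ts = [s] ++ (t :: ts) := rfl
      rw [hcons, pvE_append, List.map_append,
        pvListMin_append _ _ (by simpa using h1) (by simpa using h2),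
        ih (by simp), List.map_append,
        pvListMin_append _ _ (by simp) (by simp)]
      rfl

theorem pvBump_ne_nil (c : Int) (s : List Int) (i : Nat) (h : s ≠ []) : pvBump c s i ≠ [] := by
  cases s with
  | nil => exact absurd rfl h
  | cons x xs => cases i <;> simp [pvBump]

-- Main invariant: the dfs of A computes min-of-max over B's frontier from one state.
theorem dfs_eq_frontier (k : Nat) (hk : 1 ≤ k) :
    ∀ (rest : List Int) (s : List Int), s ≠ [] →
      pvDfsA k rest s = some (pvListMin ((pvE k rest [s]).map pvListMax)) := by
  intro rest
  induction rest with
  | nil =>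
    intro s hs
    cases s with
    | nil => exact absurd rfl hs
    | cons x xs =>
      simp [pvDfsA, pvE, PySem.List.max?_id_cons, pvListMax, pvListMin]
  | cons c rest ih =>
    intro s hs
    have hstep : ∀ i : Nat,
        pvDfsA k rest (s.set i (s.getD i 0 + c))
          = some (pvListMin ((pvE k rest [pvBump c s i]).map pvListMax)) := fun i =>
      ih (pvBump c s i) (pvBump_ne_nil c s i hs)
    have hrange : (List.range k) ≠ [] := by simp [List.range_eq_nil]; omega
    calc pvDfsA k (c :: rest) s
        = (List.range k).foldl (fun acc i =>
            pvOptMin acc (some (pvListMin ((pvE k rest [pvBump c s i]).map pvListMax)))) none := by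
          have hfun : (fun (acc : Option Int) (i : Nat) =>
              pvOptMin acc (pvDfsA k rest (s.set i (s.getD i 0 + c))))
              = fun acc i => pvOptMin acc
                  (some (pvListMin ((pvE k rest [pvBump c s i]).map pvListMax))) := by
            funext acc i; rw [hstep i]
          simp only [pvDfsA]
          rw [hfun]
      _ = some (pvListMin ((List.range k).map fun i =>
            pvListMin ((pvE k rest [pvBump c s i]).map pvListMax))) :=
          foldl_pvOptMin_none _ _ hrange
      _ = some (pvListMin ((pvE k (c :: rest) [s]).map pvListMax)) := by
          have hsingle : pvStep k [s] c = (List.range k).map (pvBump c s) := by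
            simp [pvStep]
          have : pvE k (c :: rest) [s] = pvE k rest ((List.range k).map (pvBump c s)) := by
            simp [pvE, hsingle]
          rw [this, pvE_min_decompose k hk rest _ (by
            simp [List.map_eq_nil_iff, List.range_eq_nil]; omega), List.map_map]
          rfl

-- ===== VERDICT (by name: the statement is the Claim_ definition above) =====
theorem distributeCookies_spec : Claim_equal_distributeCookies := by
  intro cookies k _ hpre
  have hk : 1 ≤ k.toNat := by
    have : (1 : Int) ≤ k := hpre
    omega
  have hrep : (List.replicate k.toNat (0 : Int)) ≠ [] := by
    simp [List.replicate_eq_nil_iff]; omega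
  show distributeCookies cookies k = distributeCookies_alt cookies k
  unfold distributeCookies distributeCookies_alt
  rw [dfs_eq_frontier k.toNat hk cookies _ hrep]
  rfl
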